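-- pv_equiv track=rewrite | github.com/rutgers-db/DynamicSegmentGraph | simulation/util.py | generate_frequency_ranges
-- ===== SOURCE A (Python) =====
-- def generate_frequency_ranges(max_freq):
--     """
--     根据最大频次生成合适的频次范围。
--
--     参数:
--     max_freq (int): 最大频次。
--
--     返回:
--     list of tuple: 频次范围列表。
--     """
--     ranges = [(1, 1), (2, 2)]
--     step = 2
--     start = 3
--     while start <= max_freq:
--         end = min(start + step - 1, max_freq)
--         ranges.append((start, end))
--         start += step
--         step *= 2  # 增加步长以生成更大的范围
--     return ranges
-- ===== SOURCE B (Python) =====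
-- def generate_frequency_ranges(max_freq):
--     if max_freq < 3:
--         return [(1, 1), (2, 2)]
--     n = (max_freq - 1).bit_length()
--     bounds = [1, 2] + [1 << k for k in range(2, n)] + [max_freq]
--     return [(1, 1)] + list(zip([b + 1 for b in bounds[:-1]], bounds[1:]))
-- ===== Notes on version B (the rewrite author's own statement) =====
-- stated objective: alternative
-- what changed: B has no while loop: it computes the bucket count in closed form via (max_freq-1).bit_length(), materialises the sorted boundary list [1, 2, 4, ..., 2^(n-1), max_freq], and zips adjacent boundaries (prev+1, next) into ranges, instead of A's iterative start/step accumulator loop that appends ranges one by one.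
import Mathlib
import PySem

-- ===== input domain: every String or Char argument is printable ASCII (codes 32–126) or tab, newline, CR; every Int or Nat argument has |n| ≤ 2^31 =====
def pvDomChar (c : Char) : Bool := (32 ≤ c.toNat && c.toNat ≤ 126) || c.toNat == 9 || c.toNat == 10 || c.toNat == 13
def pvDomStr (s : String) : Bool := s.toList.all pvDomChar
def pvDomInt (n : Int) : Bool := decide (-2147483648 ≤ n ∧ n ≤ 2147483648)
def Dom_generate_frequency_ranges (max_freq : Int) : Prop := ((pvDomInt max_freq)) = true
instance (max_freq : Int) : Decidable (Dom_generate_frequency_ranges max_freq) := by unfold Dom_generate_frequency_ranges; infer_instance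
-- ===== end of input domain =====

-- B is loop-free: it computes the bucket count from bit_length, materialises the
-- sorted boundary list [1, 2, 4, …, 2^(n-1), max_freq], and zips adjacent
-- boundaries into ranges; objective: alternative decomposition.

-- ===== PORT A =====
-- A's while loop: state (start, step); the hypothesis 1 ≤ step is only for
-- termination (it holds at the initial call step = 2 and is preserved).
def generate_frequency_ranges_go (max_freq start step : Int) (h : 1 ≤ step) :
    List (Int × Int) :=
  if start ≤ max_freq then
    (start, min (start + step - 1) max_freq) ::
      generate_frequency_ranges_go max_freq (start + step) (step * 2) (by omega)
  else []
termination_by (max_freq + 1 - start).toNat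
decreasing_by omega

def generate_frequency_ranges (max_freq : Int) : List (Int × Int) :=
  (1, 1) :: (2, 2) :: generate_frequency_ranges_go max_freq 3 2 (by omega)

-- ===== PORT B =====
-- (max_freq - 1).bit_length() for max_freq ≥ 3 is log2 (max_freq - 1) + 1; exact here.
def generate_frequency_ranges_alt (max_freq : Int) : List (Int × Int) :=
  if max_freq < 3 then [(1, 1), (2, 2)]
  else
    let n : Nat := (max_freq - 1).toNat.log2 + 1
    let bounds : List Int :=
      [1, 2] ++ (PySem.List.pyRange 2 n 1).map (fun k => (2 : Int) ^ k.toNat) ++ [max_freq]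
    [(1, 1)] ++ List.zip (bounds.dropLast.map (· + 1)) bounds.tail

-- ===== PRECONDITION & SPEC =====
def Spec_generate_frequency_ranges (max_freq : Int) (out : List (Int × Int)) : Prop := out = generate_frequency_ranges_alt max_freq
instance (max_freq : Int) (out : List (Int × Int)) : Decidable (Spec_generate_frequency_ranges max_freq out) := by unfold Spec_generate_frequency_ranges; infer_instance

-- ===== CLAIM (what is proved, stated in full; the proofs are below) =====
def Claim_equal_generate_frequency_ranges : Prop := ∀ (max_freq : Int), Dom_generate_frequency_ranges max_freq → Spec_generate_frequency_ranges max_freq (generate_frequency_ranges max_freq)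

-- ===== LEMMAS AND PROOFS =====

-- zip of (dropLast + 1) with tail = adjacent pairs
def pvPairs : List Int → List (Int × Int)
  | a :: b :: rest => (a + 1, b) :: pvPairs (b :: rest)
  | _ => []

lemma zip_eq_pvPairs (l : List Int) :
    List.zip (l.dropLast.map (· + 1)) l.tail = pvPairs l := by
  induction l with
  | nil => rfl
  | cons a t ih =>
    cases t with
    | nil => rfl
    | cons b r => exact congrArg (List.cons (a + 1, b)) ih

-- The core invariant: A's loop from state (2^k + 1, 2^k) produces exactly the
-- adjacent pairs of the boundary list [2^k, 2^(k+1), …, 2^(n-1), max_freq],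
-- provided 2^(n-1) < max_freq ≤ 2^n and k ≤ n - 1.
lemma go_eq_pairs (max_freq : Int) (n : Nat) (h1 : (2 : Int) ^ (n - 1) < max_freq)
    (h2 : max_freq ≤ (2 : Int) ^ n) (hn : 1 ≤ n) :
    ∀ (k : Nat) (hk : k ≤ n - 1) (hp : 1 ≤ (2 : Int) ^ k),
      generate_frequency_ranges_go max_freq ((2 : Int) ^ k + 1) ((2 : Int) ^ k) hp =
        pvPairs (((List.range' k (n - 1 - k)).map (fun j => (2 : Int) ^ j)) ++
                  [(2 : Int) ^ (n - 1), max_freq]) := by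
    intro k
    induction hd : n - 1 - k generalizing k with
    | zero =>
      intro hk hp
      have hkn : k = n - 1 := by omega
      subst hkn
      simp only [List.range'_zero, List.map_nil, List.nil_append, pvPairs]
      rw [generate_frequency_ranges_go]
      have hpow : (2 : Int) ^ (n - 1) * 2 = 2 ^ n := by
        rw [← pow_succ]; congr 1; omega
      rw [if_pos (by omega)]
      have hmin : min ((2 : Int) ^ (n - 1) + 1 + 2 ^ (n - 1) - 1) max_freq = max_freq := by
        omega
      rw [generate_frequency_ranges_go, if_neg (by omega), hmin]
    | succ m ih =>
      intro hk hp
      have hkn : k < n - 1 := by omega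
      have hmono : (2 : Int) ^ (k + 1) ≤ 2 ^ (n - 1) :=
        pow_le_pow_right₀ (by norm_num) (by omega)
      have hpow : (2 : Int) ^ k * 2 = 2 ^ (k + 1) := by rw [← pow_succ]
      rw [generate_frequency_ranges_go, if_pos (by omega), List.range'_succ]
      have hrec := ih (k + 1) (by omega) (by omega) (by omega)
      simp only [List.map_cons, List.cons_append]
      -- peel one pvPairs step: head of the tail list is 2^(k+1)
      have hhead : ((List.range' (k + 1) m).map (fun j => (2 : Int) ^ j)) ++
          [(2 : Int) ^ (n - 1), max_freq] =
          (2 : Int) ^ (k + 1) :: ((((List.range' (k + 1) m).map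
            (fun j => (2 : Int) ^ j)) ++ [(2 : Int) ^ (n - 1), max_freq]).tail) := by
        rcases Nat.eq_zero_or_pos m with h0 | h0
        · have hk1 : k + 1 = n - 1 := by omega
          simp [h0, hk1]
        · obtain ⟨m', rfl⟩ : ∃ m', m = m' + 1 := ⟨m - 1, by omega⟩
          rw [List.range'_succ]
          simp
      rw [hhead, pvPairs]
      have hm : min ((2 : Int) ^ k + 1 + 2 ^ k - 1) max_freq = (2 : Int) ^ (k + 1) := by
        omega
      rw [hm]
      congr 1
      have heq : generate_frequency_ranges_go max_freq ((2 : Int) ^ k + 1 + 2 ^ k)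
          ((2 : Int) ^ k * 2) (by omega) =
          generate_frequency_ranges_go max_freq ((2 : Int) ^ (k + 1) + 1)
          ((2 : Int) ^ (k + 1)) (by rw [← hpow]; omega) := by
        congr 1 <;> omega
      rw [heq, hrec, ← hhead]

-- bit_length facts for m ≥ 1: 2^(log2 m) ≤ m < 2^(log2 m + 1)
lemma log2_bounds (m : Nat) (hm : 1 ≤ m) :
    2 ^ m.log2 ≤ m ∧ m < 2 ^ (m.log2 + 1) := by
  constructor
  · exact Nat.log2_self_le (by omega)
  · exact Nat.lt_log2_self

-- ===== VERDICT (by name: the statement is the Claim_ definition above) =====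
theorem generate_frequency_ranges_spec : Claim_equal_generate_frequency_ranges := by
  intro max_freq _
  unfold Spec_generate_frequency_ranges generate_frequency_ranges generate_frequency_ranges_alt
  by_cases hlt : max_freq < 3
  · rw [if_pos hlt]
    rw [generate_frequency_ranges_go, if_neg (by omega)]
  · rw [if_neg hlt]
    dsimp only
    push_neg at hlt
    set m : Nat := (max_freq - 1).toNat with hmdef
    have hmval : (m : Int) = max_freq - 1 := by omega
    have hm2 : 2 ≤ m := by omega
    obtain ⟨hlow, hhigh⟩ := log2_bounds m (by omega)
    set l : Nat := m.log2 with hldef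
    -- boundaries: 2^l < max_freq ≤ 2^(l+1), and l ≥ 1 since m ≥ 2
    have hlowZ : (2 : Int) ^ l < max_freq := by
      have h : ((2 : Int)) ^ l ≤ (m : Int) := by exact_mod_cast hlow
      omega
    have hhighZ : max_freq ≤ (2 : Int) ^ (l + 1) := by
      have h : (m : Int) < (2 : Int) ^ (l + 1) := by exact_mod_cast hhigh
      omega
    have hl1 : 1 ≤ l := by
      by_contra hcon
      have h0 : l = 0 := by omega
      rw [h0] at hhigh
      norm_num at hhigh
      omega
    rw [zip_eq_pvPairs]
    have hgo := go_eq_pairs max_freq (l + 1) (by simpa using hlowZ) hhighZ (by omega)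
    have hkey := hgo 1 (by omega) (by norm_num)
    -- rewrite A's loop (starting at 3 = 2^1 + 1, step 2 = 2^1) via the invariant
    have h31 : generate_frequency_ranges_go max_freq 3 2 (by omega) =
        generate_frequency_ranges_go max_freq ((2 : Int) ^ 1 + 1) ((2 : Int) ^ 1)
          (by norm_num) := by congr 1 <;> norm_num
    rw [h31, hkey, PySem.List.pyRange_one]
    -- A's boundary tail as an explicit cons of a power list
    have hA : (List.range' 1 (l + 1 - 1 - 1)).map (fun j => (2 : Int) ^ j) ++
          [(2 : Int) ^ (l + 1 - 1), max_freq] =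
        (2 : Int) :: ((List.range (l - 1)).map (fun k => (2 : Int) ^ (k + 2)) ++
          [max_freq]) := by
      have h1 : l + 1 - 1 - 1 = l - 1 := by omega
      have h2 : l + 1 - 1 = l := by omega
      rw [h1, h2, List.range'_eq_map_range, List.map_map]
      have hstep : (List.range (l - 1 + 1)).map (fun k => (2 : Int) ^ (1 + k)) =
          (2 : Int) ^ 1 :: (List.range (l - 1)).map (fun k => (2 : Int) ^ (k + 2)) := by
        rw [List.range_succ_eq_map]
        simp only [List.map_cons, List.map_map]
        refine congrArg₂ _ (by norm_num) ?_
        apply List.map_congr_left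
        intro k hk
        simp only [Function.comp]
        congr 1
        omega
      have hsnoc : ((List.range (l - 1)).map (fun k => (2 : Int) ^ (1 + k))) ++
          [(2 : Int) ^ l] = (List.range (l - 1 + 1)).map (fun k => (2 : Int) ^ (1 + k)) := by
        rw [List.range_succ, List.map_append]
        have h11 : (1 : Nat) + (l - 1) = l := by omega
        simp [h11]
      calc (List.range (l - 1)).map ((fun j => (2 : Int) ^ j) ∘ (fun k => 1 + k)) ++
            [(2 : Int) ^ l, max_freq]
          = ((List.range (l - 1)).map (fun k => (2 : Int) ^ (1 + k)) ++
            [(2 : Int) ^ l]) ++ [max_freq] := by simp [Function.comp]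
        _ = (List.range (l - 1 + 1)).map (fun k => (2 : Int) ^ (1 + k)) ++ [max_freq] := by
            rw [hsnoc]
        _ = _ := by rw [hstep]; norm_num
    rw [hA]
    refine congrArg _ ?_
    -- B's middle list: range(2, l + 2) ↦ 2^k equals the same power list
    have hmid : (List.range ((((l + 1 : Nat) : Int)) - 2).toNat).map
          ((fun k => (2 : Int) ^ k.toNat) ∘ (fun (k : Nat) => 2 + (k : Int))) =
        (List.range (l - 1)).map (fun k => (2 : Int) ^ (k + 2)) := by
      have hcnt : ((((l + 1 : Nat) : Int)) - 2).toNat = l - 1 := by push_cast; omega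
      rw [hcnt]
      apply List.map_congr_left
      intro k hk
      simp only [Function.comp]
      congr 1
      omega
    simp only [List.map_map]
    rw [hmid]
    cases hc : (List.range (l - 1)).map (fun k => (2 : Int) ^ (k + 2)) with
    | nil => norm_num [pvPairs]
    | cons x xs => norm_num [pvPairs]
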